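-- pv_equiv track=rewrite | github.com/isaidspaghetti/Python | Pygorithms.py | anagramCheckoff
-- ===== SOURCE A (Python) =====
-- def anagramCheckoff (string1, string2):
--     #strings are immutable, string1 does not need to be changed but 2 does. convert to list
--     string1 =string1.lower()
--     string2 = string2.lower()
--     list2=list(string2)
--
--     #check if each item in list1 is in list 2
--     #ii is character in string1
--     ii=0
--     #start by assuming is an anagram
--     isAnagram = True
--     while ii < len(string1) and isAnagram:
--         #jj is character in string2
--         jj = 0
--         found = False
--         while jj < len(list2) and not found:
--             if string1[ii] == list2[jj]:
--                 found = True
--             else: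
--                 jj += 1
--             # once we find a match remove both from the list. Must include else repeated letters in string1
--             # will always be found
--         if found:
--             list2[jj] = None
--         else:
--             isAnagram = False
--         ii += 1
--     return isAnagram
-- ===== SOURCE B (Python) =====
-- def anagramCheckoff(string1, string2):
--     a = sorted(string1.lower())
--     b = sorted(string2.lower())
--     i = 0
--     j = 0
--     n = len(b)
--     while i < len(a):
--         x = a[i]
--         while j < n and b[j] != x:
--             j += 1
--         if j == n:
--             return False
--         i += 1
--         j += 1
--     return True
-- ===== Notes on version B (the rewrite author's own statement) =====
-- stated objective: faster
-- what changed: Replaces the quadratic scan-and-mark-None search over string2 with sorting both lowercased strings and a single two-pointer merge that consumes each char of string1 from string2.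
import Mathlib
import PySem

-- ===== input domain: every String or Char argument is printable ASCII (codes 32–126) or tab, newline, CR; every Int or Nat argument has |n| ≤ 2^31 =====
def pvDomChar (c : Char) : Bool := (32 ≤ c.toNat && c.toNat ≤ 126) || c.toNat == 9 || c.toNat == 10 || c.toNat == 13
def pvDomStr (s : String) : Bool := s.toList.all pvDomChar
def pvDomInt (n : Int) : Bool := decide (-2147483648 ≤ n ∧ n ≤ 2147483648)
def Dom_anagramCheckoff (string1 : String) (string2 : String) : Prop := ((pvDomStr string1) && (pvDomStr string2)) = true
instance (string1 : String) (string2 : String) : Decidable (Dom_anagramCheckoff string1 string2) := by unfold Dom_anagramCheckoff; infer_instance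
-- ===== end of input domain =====

-- ===== PORT A =====
-- B changes the algorithm: sort both lowercased strings once and do a two-pointer merge
-- instead of A's repeated linear scan with None-marking (objective: faster).

-- inner while loop of A: first index jj of list2 whose entry equals string1[ii] (None entries never match)
def aScan (c : Char) (m : List (Option Char)) : Option Nat :=
  match m with
  | [] => none
  | o :: t => if some c == o then some 0 else (aScan c t).map (· + 1)

-- outer while loop of A: for each char of string1 find and blank a match in list2
def aLoop (l1 : List Char) (m : List (Option Char)) : Bool :=
  match l1 with
  | [] => true
  | c :: rest =>
    match aScan c m with
    | some j => aLoop rest (m.set j none)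
    | none => false

def anagramCheckoff (string1 : String) (string2 : String) : Bool :=
  aLoop (PySem.Chars.lower string1.toList) ((PySem.Chars.lower string2.toList).map some)

-- ===== PORT B =====
-- two-pointer merge over the two sorted lists (B's while loops)
def bMerge (a b : List Char) : Bool :=
  match a, b with
  | [], _ => true
  | _ :: _, [] => false
  | x :: xs, y :: ys => if y == x then bMerge xs ys else bMerge (x :: xs) ys

def anagramCheckoff_alt (string1 : String) (string2 : String) : Bool :=
  bMerge (PySem.List.sorted (PySem.Chars.lower string1.toList) (fun x => x) false)
         (PySem.List.sorted (PySem.Chars.lower string2.toList) (fun x => x) false)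

-- ===== PRECONDITION & SPEC =====
def Spec_anagramCheckoff (string1 : String) (string2 : String) (out : Bool) : Prop := out = anagramCheckoff_alt string1 string2
instance (string1 : String) (string2 : String) (out : Bool) : Decidable (Spec_anagramCheckoff string1 string2 out) := by unfold Spec_anagramCheckoff; infer_instance

-- ===== CLAIM (what is proved, stated in full; the proofs are below) =====
def Claim_equal_anagramCheckoff : Prop := ∀ (string1 : String) (string2 : String), Dom_anagramCheckoff string1 string2 → Spec_anagramCheckoff string1 string2 (anagramCheckoff string1 string2)

-- ===== LEMMAS AND PROOFS =====

theorem bMerge_eq (a b : List Char) : bMerge a b = decide (List.Sublist a b) := by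
  induction b generalizing a with
  | nil => cases a <;> simp [bMerge]
  | cons y ys ih =>
    cases a with
    | nil => simp [bMerge]
    | cons x xs =>
      by_cases h : y = x
      · subst h
        simp [bMerge, ih, List.cons_sublist_cons]
      · have : (x :: xs).Sublist (y :: ys) ↔ (x :: xs).Sublist ys := by
          constructor
          · intro hs
            cases hs with
            | cons _ hs => exact hs
            | cons₂ => exact absurd rfl h
          · intro hs; exact hs.cons y
        simp [bMerge, h, ih, this]

theorem cons_subperm_iff (c : Char) (rest L : List Char) :
    List.Subperm (c :: rest) L ↔ c ∈ L ∧ List.Subperm rest (L.erase c) := by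
  constructor
  · intro h
    have hc : c ∈ L := h.subset List.mem_cons_self
    refine ⟨hc, ?_⟩
    have hp : L.Perm (c :: L.erase c) := List.perm_cons_erase hc
    exact (List.subperm_cons c).mp (hp.subperm_left.mp h)
  · rintro ⟨hc, h⟩
    have hp : L.Perm (c :: L.erase c) := List.perm_cons_erase hc
    exact hp.subperm_left.mpr ((List.subperm_cons c).mpr h)

theorem aScan_eq_none (c : Char) (m : List (Option Char)) :
    aScan c m = none ↔ some c ∉ m := by
  induction m with
  | nil => simp [aScan]
  | cons o t ih =>
    by_cases h : some c = o
    · simp [aScan, ← h]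
    · simp [aScan, h, ih, beq_iff_eq]

theorem aScan_set (c : Char) (m : List (Option Char)) (j : Nat) (h : aScan c m = some j) :
    (m.set j none).filterMap (fun x => x) = (m.filterMap (fun x => x)).erase c := by
  induction m generalizing j with
  | nil => simp [aScan] at h
  | cons o t ih =>
    by_cases ho : some c = o
    · subst ho
      simp [aScan] at h
      subst h
      simp [List.erase_cons_head]
    · simp [aScan, ho, beq_iff_eq] at h
      obtain ⟨j', hj', rfl⟩ := h
      cases o with
      | none =>
        simp only [List.set_cons_succ, List.filterMap_cons]
        exact ih j' hj'
      | some d =>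
        have hdc : d ≠ c := fun hh => ho (by rw [hh])
        simp only [List.set_cons_succ, List.filterMap_cons, List.erase_cons]
        rw [ih j' hj']
        simp [beq_iff_eq, hdc]

theorem aLoop_eq (l1 : List Char) (m : List (Option Char)) :
    aLoop l1 m = decide (List.Subperm l1 (m.filterMap (fun x => x))) := by
  induction l1 generalizing m with
  | nil => simp [aLoop, List.nil_subperm]
  | cons c rest ih =>
    cases hs : aScan c m with
    | none =>
      have hmem : some c ∉ m := (aScan_eq_none c m).mp hs
      have : c ∉ m.filterMap (fun x => x) := by
        simp only [List.mem_filterMap]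
        rintro ⟨a, ha, rfl⟩
        exact hmem ha
      have hns : ¬ List.Subperm (c :: rest) (m.filterMap (fun x => x)) := fun h =>
        this (h.subset List.mem_cons_self)
      simp only [aLoop, hs]
      exact (decide_eq_false hns).symm
    | some j =>
      have hmem : some c ∈ m := by
        by_contra hc
        rw [← aScan_eq_none c m] at hc
        simp [hc] at hs
      have hc : c ∈ m.filterMap (fun x => x) := by
        simp only [List.mem_filterMap]
        exact ⟨some c, hmem, rfl⟩
      simp only [aLoop, hs]
      rw [ih, aScan_set c m j hs]
      simp [cons_subperm_iff, hc]

theorem sorted_sublist_iff_subperm (l1 l2 : List Char) :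
    List.Sublist (PySem.List.sorted l1 (fun x => x) false)
      (PySem.List.sorted l2 (fun x => x) false) ↔ List.Subperm l1 l2 := by
  have p1 : (PySem.List.sorted l1 (fun x => x) false).Perm l1 :=
    PySem.List.sorted_perm l1 (fun x => x) false
  have p2 : (PySem.List.sorted l2 (fun x => x) false).Perm l2 :=
    PySem.List.sorted_perm l2 (fun x => x) false
  constructor
  · intro h
    exact p2.subperm_left.mp (p1.subperm_right.mp h.subperm)
  · intro h
    have hsp : List.Subperm (PySem.List.sorted l1 (fun x => x) false)
        (PySem.List.sorted l2 (fun x => x) false) :=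
      p2.subperm_left.mpr (p1.subperm_right.mpr h)
    exact List.sublist_of_subperm_of_pairwise hsp
      (PySem.List.sorted_pairwise (key := fun x => x) (xs := l1))
      (PySem.List.sorted_pairwise (key := fun x => x) (xs := l2))

-- ===== VERDICT (by name: the statement is the Claim_ definition above) =====
theorem anagramCheckoff_spec : Claim_equal_anagramCheckoff := by
  intro string1 string2 _
  unfold Spec_anagramCheckoff anagramCheckoff anagramCheckoff_alt
  rw [aLoop_eq, bMerge_eq]
  simp [List.filterMap_map, sorted_sublist_iff_subperm]
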